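-- pv_equiv track=rewrite | github.com/SocietyMaster/AFLIoT | experiments/instrument-loc-compare/inst-loc-comparison.py | count_per_func
-- ===== SOURCE A (Python) =====
-- def count_per_func(config):
--     counter = dict()
--     for func, ref in config:
--         if func in counter:
--             counter[func].add(ref)
--         else:
--             counter[func] = set([ref])
--     counter = dict(map(lambda x: (x[0], len(x[1])), counter.items()))
--     return counter
-- ===== SOURCE B (Python) =====
-- def count_per_func(config):
--     seen = set()
--     counts = {}
--     for func, ref in config:
--         if (func, ref) not in seen:
--             seen.add((func, ref))
--             counts[func] = counts.get(func, 0) + 1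
--     return counts
-- ===== Notes on version B (the rewrite author's own statement) =====
-- stated objective: simpler
-- what changed: Replaces the dict-of-sets plus a second mapping pass by a single pass that keeps a flat set of seen (func, ref) pairs and increments an integer counter per func directly.
import Mathlib
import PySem

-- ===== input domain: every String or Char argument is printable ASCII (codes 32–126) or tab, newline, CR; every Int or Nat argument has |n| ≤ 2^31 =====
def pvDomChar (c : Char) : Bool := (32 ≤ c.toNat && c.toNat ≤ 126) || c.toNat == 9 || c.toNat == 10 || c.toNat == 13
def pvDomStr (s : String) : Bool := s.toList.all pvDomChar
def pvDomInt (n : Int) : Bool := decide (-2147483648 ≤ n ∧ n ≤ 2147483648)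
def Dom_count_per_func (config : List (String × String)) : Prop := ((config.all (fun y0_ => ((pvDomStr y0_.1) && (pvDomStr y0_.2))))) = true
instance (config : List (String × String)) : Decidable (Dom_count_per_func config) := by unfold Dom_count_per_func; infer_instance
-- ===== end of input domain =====

-- B replaces A's dict-of-sets plus second mapping pass by one pass over a flat set
-- of seen (func, ref) pairs with an integer counter per func (objective: simpler).

-- ===== PORT A =====
-- one iteration of A's for-loop over the counter dict (func -> set of refs)
def cpfStepA (c : PySem.Dict String (PySem.Set String)) (p : String × String) :
    PySem.Dict String (PySem.Set String) :=
  if c.contains p.1 then c.modify p.1 [] (fun s => PySem.Set.add s p.2)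
  else c.insert p.1 (PySem.Set.ofList [p.2])

def count_per_func (config : List (String × String)) : List (String × Int) :=
  let counter := config.foldl cpfStepA PySem.Dict.empty
  (PySem.Dict.ofList (counter.items.map (fun x => (x.1, (PySem.Set.len x.2 : Int))))).items

-- ===== PORT B =====
-- one iteration of B's loop: state = (seen pair-set, counts dict)
def cpfStepB (st : PySem.Set (String × String) × PySem.Dict String Int)
    (p : String × String) : PySem.Set (String × String) × PySem.Dict String Int :=
  if st.1.contains p then st
  else (PySem.Set.add st.1 p, st.2.insert p.1 (st.2.getD p.1 0 + 1))

def count_per_func_alt (config : List (String × String)) : List (String × Int) :=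
  (config.foldl cpfStepB (PySem.Set.empty, PySem.Dict.empty)).2.items

-- ===== PRECONDITION & SPEC =====
def Spec_count_per_func (config : List (String × String)) (out : List (String × Int)) : Prop := out = count_per_func_alt config
instance (config : List (String × String)) (out : List (String × Int)) : Decidable (Spec_count_per_func config out) := by unfold Spec_count_per_func; infer_instance

-- ===== CLAIM (what is proved, stated in full; the proofs are below) =====
def Claim_equal_count_per_func : Prop := ∀ (config : List (String × String)), Dom_count_per_func config → Spec_count_per_func config (count_per_func config)

-- ===== LEMMAS AND PROOFS =====

-- loop invariant linking B's (seen, counts) state to A's counter dict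
def cpfInv (seen : PySem.Set (String × String)) (counts : PySem.Dict String Int)
    (c : PySem.Dict String (PySem.Set String)) : Prop :=
  counts.keys = c.keys ∧ c.keys.Nodup ∧
  (∀ f : String, counts.getD f 0 = ((c.getD f []).length : Int)) ∧
  (∀ f r : String, (f, r) ∈ seen ↔ r ∈ c.getD f [])

theorem cpfInv_step (seen : PySem.Set (String × String)) (counts : PySem.Dict String Int)
    (c : PySem.Dict String (PySem.Set String)) (p : String × String)
    (h : cpfInv seen counts c) :
    cpfInv (cpfStepB (seen, counts) p).1 (cpfStepB (seen, counts) p).2 (cpfStepA c p) := by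
  obtain ⟨hk, hnd, hcnt, hseen⟩ := h
  obtain ⟨f, r⟩ := p
  by_cases hp : (f, r) ∈ seen
  · -- pair already seen: B leaves its state alone, A re-adds an existing ref
    have hr : r ∈ c.getD f [] := (hseen f r).1 hp
    have hcA : c.contains f = true := by
      by_contra hc
      rw [PySem.Dict.getD_of_not_contains c [] (Bool.not_eq_true _ ▸ hc)] at hr
      simp at hr
    have hkeysA : (c.modify f [] (fun s => PySem.Set.add s r)).keys = c.keys := by
      rw [PySem.Dict.keys_modify, PySem.Dict.keys_insert_of_contains c _ hcA]
    simp only [cpfStepB, cpfStepA, hcA, if_true, (PySem.Set.contains_iff seen (f, r)).mpr hp]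
    refine ⟨hkeysA ▸ hk, hkeysA ▸ hnd, ?_, ?_⟩
    · intro f'
      rw [PySem.Dict.getD_modify]
      split_ifs with he
      · subst he; rw [hcnt, PySem.Set.add_of_mem hr]
      · exact hcnt f'
    · intro f' r'
      rw [hseen, PySem.Dict.getD_modify]
      split_ifs with he
      · subst he; rw [PySem.Set.add_of_mem hr]
      · rfl
  · -- new pair
    have hnp : PySem.Set.contains seen (f, r) = false := by
      cases hc : PySem.Set.contains seen (f, r) with
      | true => exact absurd ((PySem.Set.contains_iff seen (f, r)).mp hc) hp
      | false => rfl
    have hrn : r ∉ c.getD f [] := fun hr => hp ((hseen f r).2 hr)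
    cases hcA : c.contains f with
    | true =>
      have hcB : counts.contains f = true :=
        (PySem.Dict.contains_iff_mem_keys counts f).mpr
          (hk ▸ (PySem.Dict.contains_iff_mem_keys c f).mp hcA)
      have hkeysA : (c.modify f [] (fun s => PySem.Set.add s r)).keys = c.keys := by
        rw [PySem.Dict.keys_modify, PySem.Dict.keys_insert_of_contains c _ hcA]
      simp only [cpfStepB, cpfStepA, hcA, if_true, hnp, Bool.false_eq_true, if_false]
      refine ⟨?_, hkeysA ▸ hnd, ?_, ?_⟩
      · rw [PySem.Dict.keys_insert_of_contains counts _ hcB, hkeysA, hk]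
      · intro f'
        rw [PySem.Dict.getD_insert, PySem.Dict.getD_modify]
        split_ifs with he
        · subst he
          rw [hcnt, PySem.Set.add_of_not_mem hrn]
          simp
        · exact hcnt f'
      · intro f' r'
        rw [PySem.Set.mem_add, hseen, PySem.Dict.getD_modify]
        split_ifs with he
        · subst he
          rw [PySem.Set.add_of_not_mem hrn]
          simp only [List.mem_append, List.mem_singleton, Prod.mk.injEq, true_and]
        · simp only [Prod.mk.injEq]
          tauto
    | false =>
      have hcB : counts.contains f = false := by
        cases hcc : counts.contains f with
        | true =>
          have : f ∈ c.keys := hk ▸ (PySem.Dict.contains_iff_mem_keys counts f).mp hcc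
          rw [(PySem.Dict.contains_iff_mem_keys c f).mpr this] at hcA
          exact absurd hcA (by simp)
        | false => rfl
      have hge : c.getD f [] = [] := PySem.Dict.getD_of_not_contains c [] hcA
      have hfk : f ∉ c.keys := fun hm => by
        rw [(PySem.Dict.contains_iff_mem_keys c f).mpr hm] at hcA; exact absurd hcA (by simp)
      simp only [cpfStepB, cpfStepA, hcA, Bool.false_eq_true, if_false, hnp]
      refine ⟨?_, ?_, ?_, ?_⟩
      · rw [PySem.Dict.keys_insert_of_not_contains counts _ hcB,
            PySem.Dict.keys_insert_of_not_contains c _ hcA, hk]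
      · rw [PySem.Dict.keys_insert_of_not_contains c _ hcA]
        exact List.Nodup.append hnd (List.nodup_singleton f)
          (by simpa [List.disjoint_singleton] using hfk)
      · intro f'
        rw [PySem.Dict.getD_insert, PySem.Dict.getD_insert]
        split_ifs with he
        · subst he
          rw [hcnt, hge]
          simp [PySem.Set.ofList]
        · exact hcnt f'
      · intro f' r'
        rw [PySem.Set.mem_add, hseen, PySem.Dict.getD_insert]
        split_ifs with he
        · subst he
          rw [hge]
          simp only [List.not_mem_nil, false_or, Prod.mk.injEq, true_and]
          simp [PySem.Set.ofList]
        · simp only [Prod.mk.injEq]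
          tauto

theorem cpfInv_foldl (config : List (String × String))
    (seen : PySem.Set (String × String)) (counts : PySem.Dict String Int)
    (c : PySem.Dict String (PySem.Set String)) (h : cpfInv seen counts c) :
    cpfInv (config.foldl cpfStepB (seen, counts)).1 (config.foldl cpfStepB (seen, counts)).2
      (config.foldl cpfStepA c) := by
  induction config generalizing seen counts c with
  | nil => exact h
  | cons p rest ih =>
      have := cpfInv_step seen counts c p h
      simpa [List.foldl] using ih _ _ _ this

-- ===== VERDICT (by name: the statement is the Claim_ definition above) =====
theorem count_per_func_spec : Claim_equal_count_per_func := by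
  unfold Claim_equal_count_per_func
  intro config _
  unfold Spec_count_per_func count_per_func count_per_func_alt
  have h0 : cpfInv PySem.Set.empty PySem.Dict.empty (PySem.Dict.empty (κ := String) (ν := PySem.Set String)) := by
    refine ⟨rfl, List.nodup_nil, ?_, ?_⟩
    · intro f; simp [PySem.Dict.getD_empty]
    · intro f r; simp [PySem.Set.empty, PySem.Dict.getD_empty]
  obtain ⟨hk, hnd, hcnt, hseen⟩ := cpfInv_foldl config _ _ _ h0
  set cF := config.foldl cpfStepA PySem.Dict.empty with hcF
  set stF := config.foldl cpfStepB (PySem.Set.empty, PySem.Dict.empty) with hstF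
  have hndB : stF.2.keys.Nodup := hk ▸ hnd
  have hAitems : cF.items = cF.keys.map (fun k => (k, cF.getD k [])) :=
    PySem.Dict.items_eq_map_keys cF hnd []
  have hBitems : stF.2.items = stF.2.keys.map (fun k => (k, stF.2.getD k 0)) :=
    PySem.Dict.items_eq_map_keys stF.2 hndB 0
  have hmap : cF.items.map (fun x => (x.1, (PySem.Set.len x.2 : Int)))
      = cF.keys.map (fun k => (k, ((cF.getD k []).length : Int))) := by
    rw [hAitems, List.map_map]; rfl
  have hfresh : (PySem.Dict.ofList (cF.items.map (fun x => (x.1, (PySem.Set.len x.2 : Int))))).items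
      = cF.items.map (fun x => (x.1, (PySem.Set.len x.2 : Int))) := by
    rw [hmap]
    have := PySem.Dict.items_foldl_insert_fresh
      (l := cF.keys.map (fun k => (k, ((cF.getD k []).length : Int))))
      (k := Prod.fst) (v := Prod.snd) (d := PySem.Dict.empty)
      (by intro a _; simp [PySem.Dict.contains_empty])
      (by simpa [List.map_map, Function.comp_def] using hnd)
    simpa using this
  rw [hfresh, hmap, hBitems, hk]
  apply List.map_congr_left
  intro k _
  rw [hcnt k]
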